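-- pv_equiv track=rewrite | github.com/HyangDan2/LMPilot0002 | src/token_handler.py | handle_token_limits
-- ===== SOURCE A (Python) =====
-- def handle_token_limits(conversation, max_tokens):
--     """
--     Handles the token limits for conversations by truncating or summarizing them.
--
--     Parameters:
--     conversation (list): A list of strings, where each string is a part of the conversation.
--     max_tokens (int): The maximum number of tokens allowed in the conversation.
--
--     Returns:
--     list: A list of strings that fit within the max token limit.
--     """
--     # Sample implementation - truncating the conversation if it exceeds max_tokens
--     total_tokens = 0
--     truncated_conversation = []
--
--     for turn in conversation:
--         turn_tokens = len(turn.split())  # Simple token count by splitting on whitespace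
--         if total_tokens + turn_tokens <= max_tokens:
--             truncated_conversation.append(turn)
--             total_tokens += turn_tokens
--         else:
--             break
--
--     return truncated_conversation
-- ===== SOURCE B (Python) =====
-- def handle_token_limits(conversation, max_tokens):
--     # Count how many leading turns have a running word-count total <= max_tokens,
--     # then return that prefix as a slice. (Prefix sums are nondecreasing, so
--     # counting all positions whose cumulative total fits equals the cut point.)
--     total = 0
--     n = 0
--     for turn in conversation:
--         total += len(turn.split())
--         n += total <= max_tokens
--     return conversation[:n]
-- ===== Notes on version B (the rewrite author's own statement) =====
-- stated objective: simpler
-- what changed: B never builds the output incrementally and has no break: it counts in one pass how many cumulative word totals fit (valid since prefix sums are nondecreasing) and returns a single slice of the input.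
import Mathlib
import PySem

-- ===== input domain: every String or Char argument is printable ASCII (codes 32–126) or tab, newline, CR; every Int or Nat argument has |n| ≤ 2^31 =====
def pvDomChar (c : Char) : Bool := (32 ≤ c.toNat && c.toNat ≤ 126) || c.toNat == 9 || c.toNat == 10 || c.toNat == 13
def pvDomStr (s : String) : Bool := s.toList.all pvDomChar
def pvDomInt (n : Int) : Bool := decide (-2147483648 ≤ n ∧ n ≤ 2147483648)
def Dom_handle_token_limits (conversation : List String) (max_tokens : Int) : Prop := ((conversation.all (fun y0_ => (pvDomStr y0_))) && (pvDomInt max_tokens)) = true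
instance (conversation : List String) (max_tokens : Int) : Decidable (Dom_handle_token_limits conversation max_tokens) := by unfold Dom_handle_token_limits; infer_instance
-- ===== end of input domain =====

-- B replaces A's break-and-append loop by a single counting pass (how many cumulative
-- word totals fit) followed by one slice; objective: simpler.

-- ===== PORT A =====
-- A's for-loop with break: carries (total, truncated_conversation), appends each kept turn.
def handleLoopA (m : Int) (total : Int) (acc : List String) : List String → List String
  | [] => acc
  | t :: ts =>
    let k : Int := ((PySem.Str.split₀ t).length : Int)
    if total + k ≤ m then handleLoopA m (total + k) (acc ++ [t]) ts else acc

def handle_token_limits (conversation : List String) (max_tokens : Int) : List String :=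
  handleLoopA max_tokens 0 [] conversation

-- ===== PORT B =====
-- Source B: one fold carrying (total, n), n += (total <= max_tokens); then conversation[:n].
def handle_token_limits_alt (conversation : List String) (max_tokens : Int) : List String :=
  conversation.take
    (conversation.foldl
      (fun (p : Int × Nat) turn =>
        let total := p.1 + ((PySem.Str.split₀ turn).length : Int)
        (total, p.2 + (if total ≤ max_tokens then 1 else 0)))
      (0, 0)).2

-- ===== PRECONDITION & SPEC =====
def Spec_handle_token_limits (conversation : List String) (max_tokens : Int) (out : List String) : Prop := out = handle_token_limits_alt conversation max_tokens
instance (conversation : List String) (max_tokens : Int) (out : List String) : Decidable (Spec_handle_token_limits conversation max_tokens out) := by unfold Spec_handle_token_limits; infer_instance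

-- ===== CLAIM (what is proved, stated in full; the proofs are below) =====
def Claim_equal_handle_token_limits : Prop := ∀ (conversation : List String) (max_tokens : Int), Dom_handle_token_limits conversation max_tokens → Spec_handle_token_limits conversation max_tokens (handle_token_limits conversation max_tokens)

-- ===== LEMMAS AND PROOFS =====

/-- Number of positions whose cumulative word total (starting from `total`) fits in `m`. -/
def pvCnt (m : Int) : List String → Int → Nat
  | [], _ => 0
  | t :: ts, total =>
    let tot := total + ((PySem.Str.split₀ t).length : Int)
    (if tot ≤ m then 1 else 0) + pvCnt m ts tot

theorem pvCnt_zero (m : Int) (conv : List String) (total : Int) (h : m < total) :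
    pvCnt m conv total = 0 := by
  induction conv generalizing total with
  | nil => rfl
  | cons t ts ih =>
    have hk : (0 : Int) ≤ ((PySem.Str.split₀ t).length : Int) := Int.natCast_nonneg _
    have h' : m < total + ((PySem.Str.split₀ t).length : Int) := by omega
    simp [pvCnt, ih _ h', if_neg (by omega : ¬ total + ((PySem.Str.split₀ t).length : Int) ≤ m)]

theorem pvFold_snd (m : Int) (conv : List String) (total : Int) (j : Nat) :
    (conv.foldl
      (fun (p : Int × Nat) turn =>
        let tot := p.1 + ((PySem.Str.split₀ turn).length : Int)
        (tot, p.2 + (if tot ≤ m then 1 else 0)))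
      (total, j)).2 = j + pvCnt m conv total := by
  induction conv generalizing total j with
  | nil => simp [pvCnt]
  | cons t ts ih =>
    simp only [List.foldl_cons, pvCnt, ih]
    omega

theorem pvLoopA_eq (m : Int) (conv : List String) (total : Int) (acc : List String) :
    handleLoopA m total acc conv = acc ++ conv.take (pvCnt m conv total) := by
  induction conv generalizing total acc with
  | nil => simp [handleLoopA, pvCnt]
  | cons t ts ih =>
    by_cases h : total + ((PySem.Str.split₀ t).length : Int) ≤ m
    · simp [handleLoopA, pvCnt, h, ih]
      rw [Nat.add_comm]
      rfl
    · have h0 : pvCnt m ts (total + ((PySem.Str.split₀ t).length : Int)) = 0 :=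
        pvCnt_zero _ _ _ (by omega)
      simp [handleLoopA, pvCnt, h, h0]

-- ===== VERDICT (by name: the statement is the Claim_ definition above) =====
theorem handle_token_limits_spec : Claim_equal_handle_token_limits := by
  intro conv m _
  unfold Spec_handle_token_limits handle_token_limits handle_token_limits_alt
  rw [pvLoopA_eq, pvFold_snd]
  simp
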